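-- pv_equiv track=rewrite | github.com/NeckofNickey/algorithms | two_pointers/price_drop.py | get_min_indexes
-- ===== SOURCE A (Python) =====
-- def get_min_indexes(n, arr):
--
--     if n <= 1:
--         return None
--
--     min_diff = float('inf')
--
--     i, j = 0, 1
--
--     left, right = 0, 1
--
--     while right < n:
--         if arr[left] - arr[right] < min_diff:
--             i = left
--             j = right
--             min_diff = arr[left] - arr[right]
--         if arr[right] < arr[left]:
--             left = right
--         right += 1
--
--     return [i + 1, j + 1]
-- ===== SOURCE B (Python) =====
-- def get_min_indexes(n, arr):
--     if n <= 1: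
--         return None
--     # pass 1: pmin[r] = index of the minimum of arr[0..r-1] (earliest on ties)
--     pmin = [0]
--     cur = 0
--     for r in range(1, n):
--         pmin.append(cur)
--         if arr[r] < arr[cur]:
--             cur = r
--     # pass 2: earliest pair minimising arr[pmin[r]] - arr[r]
--     best_i, best_j = pmin[1], 1
--     best = arr[pmin[1]] - arr[1]
--     for r in range(2, n):
--         d = arr[pmin[r]] - arr[r]
--         if d < best:
--             best_i, best_j, best = pmin[r], r, d
--     return [best_i + 1, best_j + 1]
-- ===== Notes on version B (the rewrite author's own statement) =====
-- stated objective: alternative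
-- what changed: Replaces the fused single two-pointer while-loop (running best pair and running-min index updated together) by an explicit prefix-minimum index table built in a first pass plus a separate scan over that table that picks the earliest strictly-minimal difference pair.
import Mathlib
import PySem

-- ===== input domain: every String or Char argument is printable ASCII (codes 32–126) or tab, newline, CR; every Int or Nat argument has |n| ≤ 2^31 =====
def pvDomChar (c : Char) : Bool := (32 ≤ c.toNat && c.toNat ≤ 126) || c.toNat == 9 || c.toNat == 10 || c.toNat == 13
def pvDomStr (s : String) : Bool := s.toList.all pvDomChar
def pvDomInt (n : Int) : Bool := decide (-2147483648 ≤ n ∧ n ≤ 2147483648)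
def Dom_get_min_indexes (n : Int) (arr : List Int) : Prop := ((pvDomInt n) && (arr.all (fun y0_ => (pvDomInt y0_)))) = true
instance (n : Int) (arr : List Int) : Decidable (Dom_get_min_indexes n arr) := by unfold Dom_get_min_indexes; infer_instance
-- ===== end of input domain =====

-- B is an alternative decomposition of A's fused two-pointer scan: a prefix-minimum index
-- table built first, then a separate scan choosing the earliest strictly-minimal difference.

-- ===== PORT A =====
-- one iteration of A's while-loop; state = (i, j, left, min_diff) with none = float('inf')
def stepA (arr : List Int) (st : Int × Int × Int × Option Int) (right : Int) :
    Int × Int × Int × Option Int :=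
  let l := PySem.List.pyGetD arr st.2.2.1 0
  let r := PySem.List.pyGetD arr right 0
  let upd : Bool := match st.2.2.2 with
    | none => true
    | some m => decide (l - r < m)
  ( if upd then st.2.2.1 else st.1,
    if upd then right else st.2.1,
    if r < l then right else st.2.2.1,
    if upd then some (l - r) else st.2.2.2 )

def get_min_indexes (n : Int) (arr : List Int) : Option (List Int) :=
  if n ≤ 1 then none
  else
    let st := (PySem.List.pyRange 1 n 1).foldl (stepA arr) (0, 1, 0, none)
    some [st.1 + 1, st.2.1 + 1]

-- ===== PORT B =====
-- pass 1 step: append the running-min index, then update it on strict decrease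
def stepP (arr : List Int) (st : List Int × Int) (r : Int) : List Int × Int :=
  (st.1 ++ [st.2],
   if PySem.List.pyGetD arr r 0 < PySem.List.pyGetD arr st.2 0 then r else st.2)

-- pass 2 step: keep the earliest pair with a strictly smaller difference
def stepS (arr pmin : List Int) (st : Int × Int × Int) (r : Int) : Int × Int × Int :=
  let pr := PySem.List.pyGetD pmin r 0
  let d := PySem.List.pyGetD arr pr 0 - PySem.List.pyGetD arr r 0
  if d < st.2.2 then (pr, r, d) else st

def get_min_indexes_alt (n : Int) (arr : List Int) : Option (List Int) :=
  if n ≤ 1 then none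
  else
    let pmin := ((PySem.List.pyRange 1 n 1).foldl (stepP arr) ([0], 0)).1
    let p1 := PySem.List.pyGetD pmin 1 0
    let st := (PySem.List.pyRange 2 n 1).foldl (stepS arr pmin)
      (p1, 1, PySem.List.pyGetD arr p1 0 - PySem.List.pyGetD arr 1 0)
    some [st.1 + 1, st.2.1 + 1]

-- ===== PRECONDITION & SPEC =====
-- Pre_ excludes exactly the inputs where the Python A raises IndexError: 2 ≤ n but n > len(arr).
def Pre_get_min_indexes (n : Int) (arr : List Int) : Prop :=
  n ≤ 1 ∨ n ≤ (arr.length : Int)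
instance (n : Int) (arr : List Int) : Decidable (Pre_get_min_indexes n arr) := by
  unfold Pre_get_min_indexes; infer_instance

def pvWitness_get_min_indexes : Int × List Int := (4, [7, 3, 5, 1])

def Spec_get_min_indexes (n : Int) (arr : List Int) (out : Option (List Int)) : Prop :=
  out = get_min_indexes_alt n arr
instance (n : Int) (arr : List Int) (out : Option (List Int)) :
    Decidable (Spec_get_min_indexes n arr out) := by
  unfold Spec_get_min_indexes; infer_instance

-- ===== CLAIM (what is proved, stated in full; the proofs are below) =====
def Claim_equal_get_min_indexes : Prop :=
  ∀ (n : Int) (arr : List Int), Dom_get_min_indexes n arr →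
    Pre_get_min_indexes n arr → Spec_get_min_indexes n arr (get_min_indexes n arr)

-- ===== LEMMAS AND PROOFS =====

-- Nat-indexed unfoldings of the three folds (step t processes right = t, resp. t+1)
def Pt (arr : List Int) : Nat → List Int × Int
  | 0 => ([0], 0)
  | t + 1 => stepP arr (Pt arr t) (1 + (t : Int))

def At (arr : List Int) : Nat → Int × Int × Int × Option Int
  | 0 => (0, 1, 0, none)
  | t + 1 => stepA arr (At arr t) (1 + (t : Int))

def St (arr pmin : List Int) (init : Int × Int × Int) : Nat → Int × Int × Int
  | 0 => init
  | t + 1 => stepS arr pmin (St arr pmin init t) (2 + (t : Int))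

lemma P_eq (arr : List Int) (t : Nat) :
    (PySem.List.pyRange 1 (1 + (t : Int)) 1).foldl (stepP arr) ([0], 0) = Pt arr t := by
  induction t with
  | zero => simp [PySem.List.pyRange_one_eq_nil, Pt]
  | succ t ih =>
    have h : (1 : Int) + ((t + 1 : Nat) : Int) = (1 + (t : Int)) + 1 := by push_cast; ring
    rw [h, PySem.List.pyRange_one_succ_right (by omega), List.foldl_append]
    simp [Pt, ih]

lemma A_eq (arr : List Int) (t : Nat) :
    (PySem.List.pyRange 1 (1 + (t : Int)) 1).foldl (stepA arr) (0, 1, 0, none) = At arr t := by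
  induction t with
  | zero => simp [PySem.List.pyRange_one_eq_nil, At]
  | succ t ih =>
    have h : (1 : Int) + ((t + 1 : Nat) : Int) = (1 + (t : Int)) + 1 := by push_cast; ring
    rw [h, PySem.List.pyRange_one_succ_right (by omega), List.foldl_append]
    simp [At, ih]

lemma S_eq (arr pmin : List Int) (init : Int × Int × Int) (t : Nat) :
    (PySem.List.pyRange 2 (2 + (t : Int)) 1).foldl (stepS arr pmin) init = St arr pmin init t := by
  induction t with
  | zero => simp [PySem.List.pyRange_one_eq_nil, St]
  | succ t ih =>
    have h : (2 : Int) + ((t + 1 : Nat) : Int) = (2 + (t : Int)) + 1 := by push_cast; ring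
    rw [h, PySem.List.pyRange_one_succ_right (by omega), List.foldl_append]
    simp [St, ih]

lemma Pt_len (arr : List Int) (t : Nat) : (Pt arr t).1.length = t + 1 := by
  induction t with
  | zero => simp [Pt]
  | succ t ih => simp [Pt, stepP, ih]

-- the entry of the final table at index r+1 is the running-min index before step r+1
lemma Pt_get (arr : List Int) (T r : Nat) (h : r < T) :
    PySem.List.pyGetD (Pt arr T).1 ((r : Int) + 1) 0 = (Pt arr r).2 := by
  rw [show ((r : Int) + 1) = ((r + 1 : Nat) : Int) from by push_cast; ring,
    PySem.List.pyGetD_natCast]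
  induction T with
  | zero => omega
  | succ T ih =>
    rcases Nat.lt_succ_iff_lt_or_eq.mp h with h' | h'
    · have hl : r + 1 < (Pt arr T).1.length := by rw [Pt_len]; omega
      simpa [Pt, stepP, List.getD, List.getElem?_append_left hl] using ih h'
    · subst h'
      have hl : (Pt arr r).1.length = r + 1 := Pt_len arr r
      simp [Pt, stepP, List.getD, hl]

-- main invariant: A's state after t+1 iterations matches B's scan state and running min
lemma invariant (arr : List Int) (m : Nat)
    (pmin : List Int) (hpm : pmin = (Pt arr (m + 1)).1)
    (init : Int × Int × Int)
    (hinit : init = (PySem.List.pyGetD pmin 1 0, 1,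
      PySem.List.pyGetD arr (PySem.List.pyGetD pmin 1 0) 0 - PySem.List.pyGetD arr 1 0)) :
    ∀ t : Nat, t ≤ m →
      At arr (t + 1) =
        ((St arr pmin init t).1, (St arr pmin init t).2.1, (Pt arr (t + 1)).2,
          some (St arr pmin init t).2.2) := by
  intro t
  induction t with
  | zero =>
    intro _
    have h1 : PySem.List.pyGetD pmin 1 0 = (0 : Int) := by
      have := Pt_get arr (m + 1) 0 (by omega)
      rw [hpm]
      simpa [Pt] using this
    simp [At, St, stepA, Pt, stepP, hinit, h1]
  | succ t ih =>
    intro ht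
    have ih' := ih (by omega)
    have hidx : PySem.List.pyGetD pmin (2 + (t : Int)) 0 = (Pt arr (t + 1)).2 := by
      have := Pt_get arr (m + 1) (t + 1) (by omega)
      rw [show (2 : Int) + (t : Int) = (((t + 1) : Nat) : Int) + 1 from by push_cast; ring, hpm]
      exact this
    show stepA arr (At arr (t + 1)) (1 + ((t : Int) + 1)) = _
    rw [ih']
    have hr : (1 : Int) + ((t : Int) + 1) = 2 + (t : Int) := by ring
    rw [hr]
    show _ = ((stepS arr pmin (St arr pmin init t) (2 + (t : Int))).1,
      (stepS arr pmin (St arr pmin init t) (2 + (t : Int))).2.1, (Pt arr (t + 2)).2,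
      some (stepS arr pmin (St arr pmin init t) (2 + (t : Int))).2.2)
    have hP : (Pt arr (t + 2)).2 =
        if PySem.List.pyGetD arr (1 + ((t : Int) + 1)) 0
            < PySem.List.pyGetD arr (Pt arr (t + 1)).2 0
          then 1 + ((t : Int) + 1) else (Pt arr (t + 1)).2 := by
      show (stepP arr (Pt arr (t + 1)) (1 + ((t + 1 : Nat) : Int))).2 = _
      push_cast
      simp [stepP]
    rw [hP]
    simp only [stepA, stepS, hidx]
    have hr2 : (1 : Int) + ((t : Int) + 1) = 2 + (t : Int) := by ring
    rw [hr2]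
    by_cases hc : PySem.List.pyGetD arr (Pt arr (t + 1)).2 0
        - PySem.List.pyGetD arr (2 + (t : Int)) 0 < (St arr pmin init t).2.2 <;>
      simp [hc]

-- the two ports agree whenever 2 ≤ n (no array-bound facts are needed: both read via pyGetD)
lemma ports_agree (n : Int) (arr : List Int) (hn : ¬ n ≤ 1) :
    get_min_indexes n arr = get_min_indexes_alt n arr := by
  obtain ⟨m, hm⟩ : ∃ m : Nat, n = 2 + (m : Int) := ⟨(n - 2).toNat, by omega⟩
  subst hm
  have h2 : (2 : Int) + (m : Int) = 1 + (((m + 1) : Nat) : Int) := by push_cast; ring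
  simp only [get_min_indexes, get_min_indexes_alt, if_neg hn]
  rw [h2, P_eq, A_eq, ← h2, S_eq]
  rw [invariant arr m _ rfl _ rfl m (le_refl m)]

-- ===== VERDICT (by name: the statement is the Claim_ definition above) =====
theorem get_min_indexes_spec : Claim_equal_get_min_indexes := by
  intro n arr _ _
  unfold Spec_get_min_indexes
  by_cases hn : n ≤ 1
  · unfold get_min_indexes get_min_indexes_alt
    rw [if_pos hn, if_pos hn]
  · exact ports_agree n arr hn
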